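-- pv_equiv track=rewrite | github.com/HaShira-Lab/torah-phonetic-architecture | src/analyses/layer_c/layer_c_window_density.py | support_array
-- ===== SOURCE A (Python) =====
-- def support_array(stream,L):
--     n=len(stream)
--     sup=[0]*n
--     for i in range(n):
--         for j in range(i+1,min(i+L+1,n)):
--             if stream[i]==stream[j]:
--                 sup[i]=1; break
--     return sup
-- ===== SOURCE B (Python) =====
-- def support_array(stream, L):
--     n = len(stream)
--     sup = [0] * n
--     nxt = {}
--     for i in range(n - 1, -1, -1):
--         v = stream[i]
--         j = nxt.get(v)
--         if j is not None and j - i <= L: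
--             sup[i] = 1
--         nxt[v] = i
--     return sup
-- ===== Notes on version B (the rewrite author's own statement) =====
-- stated objective: faster
-- what changed: Replaced the per-index forward window scan by a single right-to-left pass that keeps, in a dict, the nearest later index of each value and flags i when that gap is at most L.
import Mathlib
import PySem

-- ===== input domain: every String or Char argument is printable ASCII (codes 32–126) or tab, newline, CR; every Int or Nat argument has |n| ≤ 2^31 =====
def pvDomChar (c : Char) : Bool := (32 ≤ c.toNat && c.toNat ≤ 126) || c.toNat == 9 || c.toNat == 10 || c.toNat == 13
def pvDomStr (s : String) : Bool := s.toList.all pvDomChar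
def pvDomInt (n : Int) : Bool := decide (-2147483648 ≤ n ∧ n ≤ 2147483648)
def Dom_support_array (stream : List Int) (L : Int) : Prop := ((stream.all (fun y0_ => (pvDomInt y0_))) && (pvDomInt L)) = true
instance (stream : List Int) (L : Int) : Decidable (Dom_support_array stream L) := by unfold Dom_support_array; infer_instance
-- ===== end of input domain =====

-- B replaces A's per-index forward window scan by one right-to-left pass with a
-- dict of nearest later occurrence per value (asymptotically faster).

-- ===== PORT A =====
-- inner 'for j' loop with break
def innerA (stream : List Int) (i : Int) (sup : List Int) : List Int → List Int
  | [] => sup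
  | j :: rest =>
    if PySem.List.pyGetD stream i 0 == PySem.List.pyGetD stream j 0 then
      PySem.List.pySetD sup i 1
    else innerA stream i sup rest

def support_array (stream : List Int) (L : Int) : List Int :=
  let n : Int := PySem.List.len stream
  (PySem.List.pyRange 0 n 1).foldl
    (fun sup i => innerA stream i sup (PySem.List.pyRange (i + 1) (min (i + L + 1) n) 1))
    (List.replicate n.toNat 0)

-- ===== PORT B =====
def stepB (stream : List Int) (L : Int) (st : List Int × PySem.Dict Int Int) (i : Int) :
    List Int × PySem.Dict Int Int :=
  let v := PySem.List.pyGetD stream i 0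
  let sup :=
    match st.2.get? v with          -- j = nxt.get(v); 'j is not None and j - i <= L'
    | some j => if j - i ≤ L then PySem.List.pySetD st.1 i 1 else st.1
    | none => st.1
  (sup, st.2.insert v i)            -- nxt[v] = i

def support_array_alt (stream : List Int) (L : Int) : List Int :=
  let n : Int := PySem.List.len stream
  ((PySem.List.pyRange (n - 1) (-1) (-1)).foldl (stepB stream L)
    (List.replicate n.toNat 0, PySem.Dict.empty)).1

-- ===== PRECONDITION & SPEC =====
def Spec_support_array (stream : List Int) (L : Int) (out : List Int) : Prop := out = support_array_alt stream L
instance (stream : List Int) (L : Int) (out : List Int) : Decidable (Spec_support_array stream L out) := by unfold Spec_support_array; infer_instance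

-- ===== CLAIM (what is proved, stated in full; the proofs are below) =====
def Claim_equal_support_array : Prop := ∀ (stream : List Int) (L : Int), Dom_support_array stream L → Spec_support_array stream L (support_array stream L)


-- ===== LEMMAS AND PROOFS =====

-- first index j in [a, len) with stream[j] == v (what B's dict holds)
def nextIdx (stream : List Int) (v a : Int) : Option Int :=
  (PySem.List.pyRange a (PySem.List.len stream) 1).find? (fun j => PySem.List.pyGetD stream j 0 == v)

def flagA (stream : List Int) (L i : Int) : Bool :=
  (PySem.List.pyRange (i + 1) (min (i + L + 1) (PySem.List.len stream)) 1).any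
    (fun j => PySem.List.pyGetD stream i 0 == PySem.List.pyGetD stream j 0)

def flagB (stream : List Int) (L i : Int) : Bool :=
  match nextIdx stream (PySem.List.pyGetD stream i 0) (i + 1) with
  | some j => decide (j - i ≤ L)
  | none => false

theorem innerA_eq (stream : List Int) (i : Int) (sup : List Int) (js : List Int) :
    innerA stream i sup js =
      if js.any (fun j => PySem.List.pyGetD stream i 0 == PySem.List.pyGetD stream j 0) then
        PySem.List.pySetD sup i 1
      else sup := by
  induction js with
  | nil => simp [innerA]
  | cons j rest ih =>
    by_cases h : PySem.List.pyGetD stream i 0 == PySem.List.pyGetD stream j 0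
    · simp [innerA, h]
    · simp only [innerA, Bool.not_eq_true] at *
      simp [h, ih]

theorem find?_pyRange_bound (p : Int → Bool) (a n j : Int)
    (h : (PySem.List.pyRange a n 1).find? p = some j) :
    a ≤ j ∧ j < n ∧ p j = true ∧ ∀ x, a ≤ x → x < j → p x = false := by
  have hm : (n - a).toNat = (n - a).toNat := rfl
  generalize hM : (n - a).toNat = M at hm
  clear hm
  induction M generalizing a with
  | zero =>
    rw [PySem.List.pyRange_one_eq_nil (by omega)] at h
    simp at h
  | succ m ih =>
    by_cases han : n ≤ a
    · rw [PySem.List.pyRange_one_eq_nil han] at h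
      simp at h
    · rw [PySem.List.pyRange_one_cons (by omega), List.find?_cons] at h
      cases hpa : p a with
      | true =>
        rw [hpa] at h
        simp at h
        subst h
        exact ⟨le_refl _, by omega, hpa, fun x h1 h2 => by omega⟩
      | false =>
        rw [hpa] at h
        dsimp only at h
        obtain ⟨h1, h2, h3, h4⟩ := ih (a + 1) h (by omega)
        refine ⟨by omega, h2, h3, fun x hx1 hx2 => ?_⟩
        rcases lt_or_eq_of_le hx1 with hlt | heq
        · exact h4 x (by omega) hx2
        · subst heq; exact hpa

theorem flag_eq (stream : List Int) (L i : Int) : flagA stream L i = flagB stream L i := by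
  unfold flagA flagB nextIdx
  set n : Int := PySem.List.len stream with hn
  set p : Int → Bool := fun j => PySem.List.pyGetD stream j 0 == PySem.List.pyGetD stream i 0 with hp
  cases hf : (PySem.List.pyRange (i + 1) n 1).find? p with
  | none =>
    simp only []
    rw [List.any_eq_false.mpr]
    intro j hj
    rw [PySem.List.mem_pyRange_one] at hj
    have hnone := List.find?_eq_none.mp hf j
    simp only [PySem.List.mem_pyRange_one] at hnone
    have := hnone ⟨hj.1, by omega⟩
    simp only [hp, beq_iff_eq] at this ⊢
    intro hcon
    exact this (by rw [hcon])
  | some j =>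
    obtain ⟨h1, h2, h3, h4⟩ := find?_pyRange_bound p (i + 1) n j hf
    simp only []
    by_cases hjL : j - i ≤ L
    · rw [decide_eq_true hjL]
      rw [List.any_eq_true.mpr ⟨j, ?_, ?_⟩]
      · rw [PySem.List.mem_pyRange_one]
        constructor
        · exact h1
        · omega
      · simp only [hp, beq_iff_eq] at h3 ⊢
        rw [h3]
    · rw [decide_eq_false hjL]
      rw [List.any_eq_false.mpr]
      intro x hx
      rw [PySem.List.mem_pyRange_one] at hx
      have hxj : x < j := by omega
      have := h4 x hx.1 hxj
      simp only [hp, beq_eq_false_iff_ne] at this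
      simp only [ne_eq]
      exact fun hcon => this (beq_iff_eq.mp hcon).symm

-- A's fold: every index from a on gets its flag, below a untouched
theorem foldA_spec (stream : List Int) (L : Int) (a : Int) (sup : List Int)
    (ha : 0 ≤ a) (hlen : sup.length = stream.length)
    (hz : ∀ k : Nat, a ≤ (k : Int) → k < stream.length → sup[k]? = some 0) :
    ((PySem.List.pyRange a (PySem.List.len stream) 1).foldl
        (fun sup i => if flagA stream L i then PySem.List.pySetD sup i 1 else sup) sup).length
      = stream.length ∧
    ∀ k : Nat, k < stream.length →
      ((PySem.List.pyRange a (PySem.List.len stream) 1).foldl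
          (fun sup i => if flagA stream L i then PySem.List.pySetD sup i 1 else sup) sup)[k]?
        = if a ≤ (k : Int) then some (if flagA stream L k then 1 else 0) else sup[k]? := by
  have hm : ((stream.length : Int) - a).toNat = ((stream.length : Int) - a).toNat := rfl
  generalize hM : ((stream.length : Int) - a).toNat = M at hm
  clear hm
  induction M generalizing a sup with
  | zero =>
    rw [show PySem.List.len stream = (stream.length : Int) by simp [PySem.List.len],
        PySem.List.pyRange_one_eq_nil (by omega)]
    simp only [List.foldl_nil]
    refine ⟨hlen, fun k hk => ?_⟩
    rw [if_neg (by omega)]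
  | succ m ih =>
    have haL : a < (stream.length : Int) := by omega
    rw [show PySem.List.len stream = (stream.length : Int) by simp [PySem.List.len],
        PySem.List.pyRange_one_cons haL]
    simp only [List.foldl_cons]
    set sup' : List Int := if flagA stream L a then PySem.List.pySetD sup a 1 else sup with hsup'
    have hset : PySem.List.pySetD sup a 1 = sup.set a.toNat 1 := by
      exact PySem.List.pySetD_of_nonneg sup 1 ha
    have hlen' : sup'.length = stream.length := by
      rw [hsup']; split_ifs <;> simp [hset, hlen]
    have hkeep : ∀ k : Nat, (k : Int) ≠ a → sup'[k]? = sup[k]? := by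
      intro k hne
      rw [hsup']
      split_ifs with hf
      · rw [hset]
        exact List.getElem?_set_ne (by omega)
      · rfl
    have hz' : ∀ k : Nat, a + 1 ≤ (k : Int) → k < stream.length → sup'[k]? = some 0 := by
      intro k h1 h2
      rw [hkeep k (by omega)]
      exact hz k (by omega) h2
    have hIH := ih (a + 1) sup' (by omega) hlen' hz' (by omega)
    rw [show PySem.List.len stream = (stream.length : Int) by simp [PySem.List.len]] at hIH
    refine ⟨hIH.1, fun k hk => ?_⟩
    rw [hIH.2 k hk]
    by_cases h1 : a + 1 ≤ (k : Int)
    · rw [if_pos h1, if_pos (show a ≤ (k : Int) by omega)]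
    · rw [if_neg h1]
      by_cases h2 : a ≤ (k : Int)
      · have hka : (k : Int) = a := by omega
        rw [if_pos h2, hka, hsup']
        split_ifs with hf
        · rw [hset]
          have hkn : a.toNat = k := by omega
          rw [hkn, List.getElem?_set_self (by omega)]
        · exact hz k (by omega) hk
      · rw [if_neg h2]
        exact hkeep k (by omega)

-- B's fold: indices above a already done, dict is nearest-next from a+1; afterwards all done
theorem foldB_spec (stream : List Int) (L : Int) (a : Int) (sup : List Int)
    (nxt : PySem.Dict Int Int) (han : a < (stream.length : Int))
    (hlen : sup.length = stream.length)
    (hz : ∀ k : Nat, (k : Int) ≤ a → k < stream.length → sup[k]? = some 0)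
    (hdone : ∀ k : Nat, a < (k : Int) → k < stream.length →
        sup[k]? = some (if flagB stream L k then 1 else 0))
    (hn : ∀ v : Int, nxt.get? v = nextIdx stream v (a + 1)) :
    ((PySem.List.pyRange a (-1) (-1)).foldl (stepB stream L) (sup, nxt)).1.length = stream.length ∧
    ∀ k : Nat, k < stream.length →
      ((PySem.List.pyRange a (-1) (-1)).foldl (stepB stream L) (sup, nxt)).1[k]?
        = some (if flagB stream L k then 1 else 0) := by
  have hm : (a + 1).toNat = (a + 1).toNat := rfl
  generalize hM : (a + 1).toNat = M at hm
  clear hm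
  induction M generalizing a sup nxt with
  | zero =>
    rw [PySem.List.pyRange_neg_one_eq_nil (by omega : a ≤ -1)]
    simp only [List.foldl_nil]
    exact ⟨hlen, fun k hk => hdone k (by omega) hk⟩
  | succ m ih =>
    have ha0 : 0 ≤ a := by omega
    have haN : a.toNat < stream.length := by omega
    rw [PySem.List.pyRange_neg_one_cons (by omega : (-1:Int) < a)]
    simp only [List.foldl_cons]
    have hstep : stepB stream L (sup, nxt) a =
        ((match nxt.get? (PySem.List.pyGetD stream a 0) with
          | some j => if j - a ≤ L then PySem.List.pySetD sup a 1 else sup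
          | none => sup), nxt.insert (PySem.List.pyGetD stream a 0) a) := rfl
    rw [hstep]
    set v : Int := PySem.List.pyGetD stream a 0 with hv
    set sup1 : List Int :=
      (match nxt.get? v with
        | some j => if j - a ≤ L then PySem.List.pySetD sup a 1 else sup
        | none => sup) with hsup1
    have hset : PySem.List.pySetD sup a 1 = sup.set a.toNat 1 :=
      PySem.List.pySetD_of_nonneg sup 1 ha0
    have hlen1 : sup1.length = stream.length := by
      rw [hsup1]
      rcases nxt.get? v with _ | j
      · exact hlen
      · dsimp only
        split_ifs
        · rw [hset, List.length_set]; exact hlen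
        · exact hlen
    have hkeep : ∀ k : Nat, (k : Int) ≠ a → sup1[k]? = sup[k]? := by
      intro k hne
      rw [hsup1]
      rcases nxt.get? v with _ | j
      · rfl
      · dsimp only
        split_ifs
        · rw [hset]; exact List.getElem?_set_ne (by omega)
        · rfl
    have hat : sup1[a.toNat]? = some (if flagB stream L a.toNat then 1 else 0) := by
      have hfb : flagB stream L (a.toNat : Int) = flagB stream L a := by
        rw [Int.toNat_of_nonneg ha0]
      rw [hsup1, hfb]
      have hz0 : sup[a.toNat]? = some 0 := hz a.toNat (by omega) haN
      rw [hn v]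
      unfold flagB
      rw [← hv]
      rcases nextIdx stream v (a + 1) with _ | j
      · dsimp only
        simpa using hz0
      · dsimp only
        by_cases hjL : j - a ≤ L
        · rw [if_pos hjL, if_pos (by simpa using hjL), hset,
              List.getElem?_set_self (by omega)]
        · rw [if_neg hjL, if_neg (by simpa using hjL)]
          exact hz0
    have hn' : ∀ w : Int, (nxt.insert v a).get? w = nextIdx stream w ((a - 1) + 1) := by
      intro w
      rw [show a - 1 + 1 = a by ring]
      have hcons : nextIdx stream w a
          = if (PySem.List.pyGetD stream a 0 == w) then some a else nextIdx stream w (a + 1) := by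
        unfold nextIdx
        rw [show PySem.List.len stream = (stream.length : Int) by simp [PySem.List.len],
            PySem.List.pyRange_one_cons (by omega : a < (stream.length : Int)), List.find?_cons]
        cases (PySem.List.pyGetD stream a 0 == w)
        · rfl
        · rfl
      rw [hcons, PySem.Dict.get?_insert]
      by_cases hw : w = v
      · rw [if_pos hw, hw, ← hv, if_pos (by simp)]
      · rw [if_neg hw, hn w, if_neg ?_]
        simp only [beq_iff_eq]
        exact fun h => hw h.symm
    have hz' : ∀ k : Nat, (k : Int) ≤ a - 1 → k < stream.length → sup1[k]? = some 0 := by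
      intro k h1 h2
      rw [hkeep k (by omega)]
      exact hz k (by omega) h2
    have hdone' : ∀ k : Nat, a - 1 < (k : Int) → k < stream.length →
        sup1[k]? = some (if flagB stream L k then 1 else 0) := by
      intro k h1 h2
      by_cases hka : (k : Int) = a
      · have : k = a.toNat := by omega
        rw [this]; exact hat
      · rw [hkeep k hka]
        exact hdone k (by omega) h2
    exact ih (a - 1) sup1 (nxt.insert v a) (by omega) hlen1 hz' hdone' hn' (by omega)

-- ===== VERDICT (by name: the statement is the Claim_ definition above) =====
theorem support_array_spec : Claim_equal_support_array := by
  intro stream L _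
  unfold Spec_support_array
  unfold support_array support_array_alt
  simp only []
  have hlen0 : (PySem.List.len stream).toNat = stream.length := by
    simp [PySem.List.len]
  rw [hlen0]
  -- A's step function is the flag step
  have hfun : (fun (sup : List Int) (i : Int) =>
        innerA stream i sup
          (PySem.List.pyRange (i + 1) (min (i + L + 1) (PySem.List.len stream)) 1))
      = (fun (sup : List Int) (i : Int) =>
        if flagA stream L i then PySem.List.pySetD sup i 1 else sup) := by
    funext sup i
    rw [innerA_eq]
    rfl
  rw [hfun]
  have hzrep : ∀ k : Nat, (0:Int) ≤ (k : Int) → k < stream.length →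
      (List.replicate stream.length (0:Int))[k]? = some 0 := by
    intro k _ hk
    rw [List.getElem?_replicate, if_pos hk]
  have hA := foldA_spec stream L 0 (List.replicate stream.length 0) le_rfl
    (by simp) hzrep
  have hB := foldB_spec stream L ((stream.length : Int) - 1) (List.replicate stream.length 0)
    PySem.Dict.empty (by omega) (by simp)
    (fun k h1 h2 => by rw [List.getElem?_replicate, if_pos h2])
    (fun k h1 h2 => by omega)
    (fun v => by
      rw [PySem.Dict.get?_empty]
      unfold nextIdx
      rw [show (stream.length : Int) - 1 + 1 = (stream.length : Int) by ring,
          show PySem.List.len stream = (stream.length : Int) by simp [PySem.List.len],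
          PySem.List.pyRange_one_eq_nil le_rfl]
      rfl)
  rw [show PySem.List.len stream = (stream.length : Int) by simp [PySem.List.len]] at hA ⊢
  apply List.ext_getElem?
  intro i
  by_cases hi : i < stream.length
  · rw [hA.2 i hi, hB.2 i hi, if_pos (by omega), flag_eq]
  · rw [List.getElem?_eq_none (by omega : _ ≤ i), List.getElem?_eq_none (by omega : _ ≤ i)]
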